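-- pv_equiv track=rewrite | github.com/javiercuadra/cs450-nacos | static_analyzer/find_wrappers.py | find_service_params
-- ===== SOURCE A (Python) =====
-- from typing import Dict, List, Tuple
--
-- def find_service_params(lines: List[str], start_index: int, sdk_call) -> Dict[str, str]:
--   """
--   Extracts service parameter assignments from code lines following a function definition.
--
--   Scans lines of code starting from a given index to find assignments for specific service
--   parameters: ServiceName, Ip, and Port. Assumes these parameters are assigned in a straightforward
--   manner in the lines immediately following the identified function definition.
--
--   Args:
--       lines (List[str]): All lines of code from the file being analyzed.
--       start_index (int): The index in `lines` to start the search from, usually the line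
--                           following a wrapper function definition.
--       sdk_call (str): The name of the SDK call being wrapped by the identified functions.
--
--   Returns:
--       Dict[str, str]: A dictionary mapping parameter names ("ServiceName", "Ip", "Port")
--                       to their assigned values in the code.
--   """
--   # Defines the params needed  for different SDK calls
--   if sdk_call == "RegisterInstance":
--     service_params = {"ServiceName": "", "Ip": "", "Port": ""}
--   elif sdk_call == "SelectInstance":
--     service_params = {"ServiceName": ""}
--
--   for line in lines[start_index:]:
--     for param in service_params.keys():
--       if param in line:
--         service_params[param] = line.split(":")[1].split(",")[0].strip()
--   return service_params
-- ===== SOURCE B (Python) =====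
-- def find_service_params(lines, start_index, sdk_call):
--   if sdk_call == "RegisterInstance":
--     params = ["ServiceName", "Ip", "Port"]
--   elif sdk_call == "SelectInstance":
--     params = ["ServiceName"]
--   result = {}
--   tail = lines[start_index:]
--   for param in params:
--     value = ""
--     for line in reversed(tail):
--       if param in line:
--         value = line.split(":")[1].split(",")[0].strip()
--         break
--     result[param] = value
--   return result
-- ===== Notes on version B (the rewrite author's own statement) =====
-- stated objective: alternative
-- what changed: Replaces the single interleaved pass that overwrites a dict entry on every matching line with independent per-parameter reverse scans that stop at the first (i.e. last) matching line, building the result dict once in parameter order.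
import Mathlib
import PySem

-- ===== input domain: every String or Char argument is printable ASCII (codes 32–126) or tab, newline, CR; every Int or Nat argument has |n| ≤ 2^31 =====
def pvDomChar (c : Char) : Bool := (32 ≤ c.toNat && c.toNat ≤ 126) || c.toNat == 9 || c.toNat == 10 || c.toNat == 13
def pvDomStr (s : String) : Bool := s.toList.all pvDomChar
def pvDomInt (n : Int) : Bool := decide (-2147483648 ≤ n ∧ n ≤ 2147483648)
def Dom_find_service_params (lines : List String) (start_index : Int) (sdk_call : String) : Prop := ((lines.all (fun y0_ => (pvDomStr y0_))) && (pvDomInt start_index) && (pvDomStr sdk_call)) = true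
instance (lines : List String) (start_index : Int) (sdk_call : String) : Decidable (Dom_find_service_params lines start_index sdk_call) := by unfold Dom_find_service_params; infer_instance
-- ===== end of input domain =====

-- B replaces A's single interleaved line pass (overwriting a dict entry on every match) with
-- independent per-parameter reverse scans that stop at the last matching line (objective: alternative).

-- shared helper: line.split(":")[1].split(",")[0].strip()  (the [1] is pyGet?; Pre_ ensures it exists)
def parseLine (line : String) : String :=
  let parts1 := (PySem.Str.split? line ":").getD []
  let mid := (PySem.List.pyGet? parts1 1).getD ""   -- Python raises IndexError when no ":"; excluded by Pre_
  let parts2 := (PySem.Str.split? mid ",").getD []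
  PySem.Str.strip ((PySem.List.pyGet? parts2 0).getD "")

-- ===== PORT A =====
def find_service_params (lines : List String) (start_index : Int) (sdk_call : String) : List (String × String) :=
  let service_params : PySem.Dict String String :=
    if sdk_call == "RegisterInstance" then
      PySem.Dict.ofList [("ServiceName", ""), ("Ip", ""), ("Port", "")]
    else if sdk_call == "SelectInstance" then
      PySem.Dict.ofList [("ServiceName", "")]
    else PySem.Dict.empty   -- Python raises UnboundLocalError here; excluded by Pre_
  let final := (PySem.List.slice lines (some start_index) none).foldl
    (fun d line =>
      d.keys.foldl
        (fun d' param =>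
          if PySem.Str.isIn param line then d'.insert param (parseLine line) else d')
        d)
    service_params
  final.items

-- ===== PORT B =====
def find_service_params_alt (lines : List String) (start_index : Int) (sdk_call : String) : List (String × String) :=
  let params : List String :=
    if sdk_call == "RegisterInstance" then ["ServiceName", "Ip", "Port"]
    else if sdk_call == "SelectInstance" then ["ServiceName"]
    else []   -- Python raises UnboundLocalError here; excluded by Pre_
  let tail := PySem.List.slice lines (some start_index) none
  (params.foldl
    (fun result param =>
      result.insert param
        (match tail.reverse.find? (fun line => PySem.Str.isIn param line) with
         | some line => parseLine line
         | none => ""))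
    (PySem.Dict.empty : PySem.Dict String String)).items

-- ===== PRECONDITION & SPEC =====
-- Pre_ excludes the inputs on which the Python A raises: an sdk_call that is neither branch
-- (UnboundLocalError) and a scanned line that contains a tracked param but no ":" (IndexError).
def Pre_find_service_params (lines : List String) (start_index : Int) (sdk_call : String) : Prop :=
  (sdk_call = "RegisterInstance" ∨ sdk_call = "SelectInstance") ∧
  ∀ line ∈ PySem.List.slice lines (some start_index) none,
    ∀ param ∈ (if sdk_call = "RegisterInstance" then ["ServiceName", "Ip", "Port"] else ["ServiceName"]),
      PySem.Str.isIn param line = true → PySem.Str.isIn ":" line = true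
instance (lines : List String) (start_index : Int) (sdk_call : String) : Decidable (Pre_find_service_params lines start_index sdk_call) := by unfold Pre_find_service_params; infer_instance

def pvWitness_find_service_params : List String × Int × String :=
  (["ServiceName: foo, x", "Ip: 1.2.3.4", "Port: 80"], 0, "RegisterInstance")

def Spec_find_service_params (lines : List String) (start_index : Int) (sdk_call : String) (out : List (String × String)) : Prop := out = find_service_params_alt lines start_index sdk_call
instance (lines : List String) (start_index : Int) (sdk_call : String) (out : List (String × String)) : Decidable (Spec_find_service_params lines start_index sdk_call out) := by unfold Spec_find_service_params; infer_instance

-- ===== CLAIM (what is proved, stated in full; the proofs are below) =====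
def Claim_equal_find_service_params : Prop := ∀ (lines : List String) (start_index : Int) (sdk_call : String), Dom_find_service_params lines start_index sdk_call → Pre_find_service_params lines start_index sdk_call → Spec_find_service_params lines start_index sdk_call (find_service_params lines start_index sdk_call)

-- ===== LEMMAS AND PROOFS =====

theorem pvWitness_ok :
    Dom_find_service_params pvWitness_find_service_params.1 pvWitness_find_service_params.2.1 pvWitness_find_service_params.2.2 ∧
    Pre_find_service_params pvWitness_find_service_params.1 pvWitness_find_service_params.2.1 pvWitness_find_service_params.2.2 := by
  decide

-- abbreviations used only by the proofs
def pvStep (line : String) (d : PySem.Dict String String) : PySem.Dict String String :=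
  d.keys.foldl
    (fun d' param => if PySem.Str.isIn param line then d'.insert param (parseLine line) else d') d

theorem inner_items (line : String) (P : List String) :
    ∀ (Q : List String) (d : PySem.Dict String String) (f : String → String),
      d.items = P.map (fun p => (p, f p)) → Q ⊆ P →
      (Q.foldl (fun d' p => if PySem.Str.isIn p line then d'.insert p (parseLine line) else d') d).items
        = P.map (fun p => (p, if p ∈ Q ∧ PySem.Str.isIn p line = true then parseLine line else f p)) := by
  intro Q
  induction Q with
  | nil =>
    intro d f hd _
    simpa using hd
  | cons q Q' ih =>
    intro d f hd hsub
    have hqP : q ∈ P := hsub (List.mem_cons_self ..)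
    by_cases hq : PySem.Str.isIn q line = true
    · have hkeys : d.keys = P := by
        simp [PySem.Dict.keys, hd, Function.comp_def]
      have hc : d.contains q = true := by
        rw [PySem.Dict.contains_iff_mem_keys, hkeys]; exact hqP
      have hins : (d.insert q (parseLine line)).items
          = P.map (fun p => (p, if p = q then parseLine line else f p)) := by
        rw [PySem.Dict.items_insert_of_contains d (parseLine line) hc, hd, List.map_map]
        apply List.map_congr_left
        intro p hp
        by_cases hpq : p = q <;> simp [hpq]
      have := ih (d.insert q (parseLine line)) (fun p => if p = q then parseLine line else f p)
        hins (fun x hx => hsub (List.mem_cons_of_mem _ hx))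
      rw [List.foldl_cons, if_pos hq, this]
      apply List.map_congr_left
      intro p hp
      by_cases h1 : p ∈ Q' <;> by_cases h2 : PySem.Str.isIn p line = true <;>
        by_cases h3 : p = q <;> simp_all
    · have := ih d f hd (fun x hx => hsub (List.mem_cons_of_mem _ hx))
      rw [List.foldl_cons, if_neg hq, this]
      apply List.map_congr_left
      intro p hp
      by_cases h1 : p ∈ Q' <;> by_cases h3 : p = q <;> simp_all
    
theorem step_items (line : String) (P : List String) (d : PySem.Dict String String)
    (f : String → String) (hd : d.items = P.map (fun p => (p, f p))) :
    (pvStep line d).items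
      = P.map (fun p => (p, if PySem.Str.isIn p line = true then parseLine line else f p)) := by
  have hkeys : d.keys = P := by simp [PySem.Dict.keys, hd, Function.comp_def]
  unfold pvStep
  rw [hkeys, inner_items line P P d f hd (fun x hx => hx)]
  apply List.map_congr_left
  intro p hp
  simp [hp]

def pvLast (tail : List String) (f : String → String) (p : String) : String :=
  match tail.reverse.find? (fun line => PySem.Str.isIn p line) with
  | some line => parseLine line
  | none => f p

theorem outer_items (P : List String) :
    ∀ (tail : List String) (d : PySem.Dict String String) (f : String → String),
      d.items = P.map (fun p => (p, f p)) →
      (tail.foldl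
          (fun d line =>
            d.keys.foldl
              (fun d' param =>
                if PySem.Str.isIn param line then d'.insert param (parseLine line) else d') d)
          d).items
        = P.map (fun p => (p, pvLast tail f p)) := by
  intro tail
  induction tail with
  | nil =>
    intro d f hd
    simpa [pvLast] using hd
  | cons l t ih =>
    intro d f hd
    rw [List.foldl_cons]
    have hstep :
        (d.keys.foldl
            (fun d' param =>
              if PySem.Str.isIn param l then d'.insert param (parseLine l) else d') d).items
          = P.map (fun p => (p, if PySem.Str.isIn p l = true then parseLine l else f p)) :=
      step_items l P d f hd
    rw [ih _ (fun p => if PySem.Str.isIn p l = true then parseLine l else f p) hstep]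
    apply List.map_congr_left
    intro p hp
    simp only [pvLast, List.reverse_cons, List.find?_append]
    cases h : t.reverse.find? (fun line => PySem.Str.isIn p line) with
    | some l' => simp
    | none =>
      cases h2 : PySem.Chars.isIn p.toList l.toList <;>
        simp [List.find?, PySem.Str.isIn, h2]

theorem alt_items_three (v : String → String) :
    ((["ServiceName", "Ip", "Port"] : List String).foldl
        (fun r p => r.insert p (v p)) (PySem.Dict.empty : PySem.Dict String String)).items
      = [("ServiceName", v "ServiceName"), ("Ip", v "Ip"), ("Port", v "Port")] := by
  simp [List.foldl, PySem.Dict.items_insert_of_not_contains,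
    PySem.Dict.contains_insert, PySem.Dict.empty]

theorem alt_items_one (v : String → String) :
    ((["ServiceName"] : List String).foldl
        (fun r p => r.insert p (v p)) (PySem.Dict.empty : PySem.Dict String String)).items
      = [("ServiceName", v "ServiceName")] := by
  simp [List.foldl, PySem.Dict.items_insert_of_not_contains, PySem.Dict.empty]

-- ===== VERDICT (by name: the statement is the Claim_ definition above) =====
theorem find_service_params_spec : Claim_equal_find_service_params := by
  intro lines start_index sdk_call _ hpre
  obtain ⟨hsdk, -⟩ := hpre
  unfold Spec_find_service_params find_service_params find_service_params_alt
  rcases hsdk with h | h <;> subst h <;>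
    simp only [beq_self_eq_true, if_true,
      show (("SelectInstance" : String) == "RegisterInstance") = false by decide,
      Bool.false_eq_true, if_false]
  · rw [outer_items ["ServiceName", "Ip", "Port"]
      (PySem.List.slice lines (some start_index) none) _ (fun _ => "") (by decide),
      alt_items_three]
    simp [pvLast]
  · rw [outer_items ["ServiceName"]
      (PySem.List.slice lines (some start_index) none) _ (fun _ => "") (by decide),
      alt_items_one]
    simp [pvLast]
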